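-- pv_equiv track=rewrite | github.com/learnore/helloshen | z_huawei_od/99_24_od/python/100/43.py | solution
-- ===== SOURCE A (Python) =====
-- def solution(s, l):
--     """ 双指针，按顺序依 s 次序在 l 中查找字符 """
--     result = -1
--     s_point, l_point = 0, 0
--     for i in range(len(l)):
--         if s_point == len(s):
--             return i-1
--         elif l[i] == s[s_point]:
--             s_point += 1
--
--     if s_point == len(s):
--         return len(l)-1
--
--     return result
-- ===== SOURCE B (Python) =====
-- def solution(s, l):
--     pos = -1
--     for ch in s:
--         try:
--             pos = l.index(ch, pos + 1)
--         except ValueError: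
--             return -1
--     return pos
-- ===== Notes on version B (the rewrite author's own statement) =====
-- stated objective: faster
-- what changed: Replaces A's per-character Python loop over l with a loop over the characters of s that jumps via l.index(ch, pos+1) to each next occurrence (returning -1 on ValueError), moving the scan of l into C-level str.index.
import Mathlib
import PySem

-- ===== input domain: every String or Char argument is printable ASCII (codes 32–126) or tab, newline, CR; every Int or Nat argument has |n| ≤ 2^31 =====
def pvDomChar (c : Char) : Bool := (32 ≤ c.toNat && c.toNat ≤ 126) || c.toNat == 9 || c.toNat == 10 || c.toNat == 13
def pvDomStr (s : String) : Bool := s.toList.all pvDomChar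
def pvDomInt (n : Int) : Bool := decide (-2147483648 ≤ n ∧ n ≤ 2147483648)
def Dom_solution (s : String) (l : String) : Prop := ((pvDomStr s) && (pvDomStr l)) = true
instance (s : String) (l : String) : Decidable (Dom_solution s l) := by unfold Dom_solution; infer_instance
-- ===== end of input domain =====

-- B changes the decomposition (loop over s with index-jumps in l instead of A's scan of l); return value proved equal on all inputs.

-- ===== PORT A =====
-- A's for-loop over range(len(l)) with early return: structural recursion on the
-- remaining suffix of l, carrying the running index i and s_point sp.
def aLoop (s : List Char) : List Char → Int → Nat → Int
  | [], i, sp =>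
      -- after the loop: 'if s_point == len(s): return len(l)-1 else return result';
      -- here i = len(l), so len(l)-1 = i-1
      if sp = s.length then i - 1 else -1
  | c :: rest, i, sp =>
      if sp = s.length then i - 1
      else
        match s[sp]? with
        | some c' => if c = c' then aLoop s rest (i + 1) (sp + 1) else aLoop s rest (i + 1) sp
        | none => aLoop s rest (i + 1) sp  -- unreachable: sp < s.length in Python

def solution (s : String) (l : String) : Int := aLoop s.toList l.toList 0 0

-- ===== PORT B =====
-- l.index(ch, start): first index j ≥ start with l[j] = ch (ValueError → none)
def findFrom (l : List Char) (c : Char) (j : Nat) : Option Nat :=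
  if h : j < l.length then
    if l[j] = c then some j else findFrom l c (j + 1)
  else none
termination_by l.length - j

def bLoop (l : List Char) : List Char → Int → Int
  | [], pos => pos
  | c :: cs, pos =>
      match findFrom l c (pos + 1).toNat with
      | some j => bLoop l cs (j : Int)
      | none => -1

def solution_alt (s : String) (l : String) : Int := bLoop l.toList s.toList (-1)

-- ===== PRECONDITION & SPEC =====
def Spec_solution (s : String) (l : String) (out : Int) : Prop := out = solution_alt s l
instance (s : String) (l : String) (out : Int) : Decidable (Spec_solution s l out) := by unfold Spec_solution; infer_instance

-- ===== CLAIM (what is proved, stated in full; the proofs are below) =====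
def Claim_equal_solution : Prop := ∀ (s : String) (l : String), Dom_solution s l → Spec_solution s l (solution s l)

-- ===== LEMMAS AND PROOFS =====

-- reference greedy matcher: g s rest i = index of the last char of s matched
-- greedily in rest (rest starting at global index i), or -1 if s does not embed
def g : List Char → List Char → Int → Int
  | [], _, i => i - 1
  | _ :: _, [], _ => -1
  | c :: cs, d :: ds, i => if d = c then g cs ds (i + 1) else g (c :: cs) ds (i + 1)
termination_by _ rest _ => rest.length

theorem aLoop_eq_g (s : List Char) (rest : List Char) (i : Int) (sp : Nat)
    (h : sp ≤ s.length) : aLoop s rest i sp = g (s.drop sp) rest i := by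
  induction rest generalizing i sp with
  | nil =>
      simp only [aLoop]
      by_cases hsp : sp = s.length
      · simp [hsp, g, List.drop_of_length_le]
      · have hlt : sp < s.length := lt_of_le_of_ne h hsp
        obtain ⟨c, cs, hd⟩ : ∃ c cs, s.drop sp = c :: cs := by
          cases hds : s.drop sp with
          | nil => exact absurd (List.drop_eq_nil_iff.mp hds) (by omega)
          | cons c cs => exact ⟨c, cs, rfl⟩
        simp [hsp, hd, g]
  | cons d rest ih =>
      simp only [aLoop]
      by_cases hsp : sp = s.length
      · simp [hsp, g, List.drop_of_length_le]
      · have hlt : sp < s.length := lt_of_le_of_ne h hsp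
        have hget : s[sp]? = some s[sp] := List.getElem?_eq_getElem hlt
        have hd : s.drop sp = s[sp] :: s.drop (sp + 1) := List.drop_eq_getElem_cons hlt
        rw [hd]
        simp only [hsp, if_false, hget, g]
        by_cases hc : d = s[sp]
        · simp only [hc]
          rw [ih (i + 1) (sp + 1) (by omega), ← hc]
          simp
        · simp only [if_neg hc]
          rw [ih (i + 1) sp h, hd]

theorem g_step (l : List Char) (c : Char) (cs : List Char) (j : Nat) :
    g (c :: cs) (l.drop j) (j : Int) =
      match findFrom l c j with
      | some k => g cs (l.drop (k + 1)) ((k : Int) + 1)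
      | none => -1 := by
  by_cases h : j < l.length
  · have hd : l.drop j = l[j] :: l.drop (j + 1) := List.drop_eq_getElem_cons h
    rw [hd]
    by_cases hc : l[j] = c
    · rw [findFrom]
      simp [h, hc, g]
    · have : g (c :: cs) (l[j] :: l.drop (j + 1)) (j : Int) =
          g (c :: cs) (l.drop (j + 1)) ((j : Int) + 1) := by
        conv_lhs => rw [g]
        rw [if_neg hc]
      rw [this]
      have := g_step l c cs (j + 1)
      rw [findFrom]
      simp only [h, dif_pos, hc, if_false]
      push_cast at this ⊢
      rw [this]
  · have hd : l.drop j = [] := List.drop_eq_nil_iff.mpr (by omega)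
    rw [findFrom]
    simp [hd, g, h]
termination_by l.length - j

theorem bLoop_eq_g (l : List Char) (s : List Char) (j : Nat) :
    bLoop l s ((j : Int) - 1) = g s (l.drop j) (j : Int) := by
  induction s generalizing j with
  | nil => simp [bLoop, g]
  | cons c cs ih =>
      simp only [bLoop]
      have hj : ((j : Int) - 1 + 1).toNat = j := by omega
      rw [hj, g_step l c cs j]
      cases hf : findFrom l c j with
      | none => simp
      | some k =>
          simp only
          have := ih (k + 1)
          push_cast at this
          rw [show (k : Int) = ((k : Int) + 1) - 1 by ring, this]
          norm_num

-- ===== VERDICT (by name: the statement is the Claim_ definition above) =====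
theorem solution_spec : Claim_equal_solution := by
  intro s l _
  unfold Spec_solution solution solution_alt
  rw [aLoop_eq_g s.toList l.toList 0 0 (Nat.zero_le _), List.drop_zero]
  have := bLoop_eq_g l.toList s.toList 0
  simp only [Nat.cast_zero, List.drop_zero] at this
  rw [show (-1 : Int) = (0 : Int) - 1 by ring, this]
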